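-- pv_equiv track=rewrite | github.com/bassemhossam/TINY-Language-Scanner | Scanner.py | id_token
-- ===== SOURCE A (Python) =====
-- tiny_dict = {
--     "reserved_words": (
--                 "if", "then", "else",
--                 "repeat", "read", "write",
--                 "until", "end"),
--     "symbols": ("/", ":=", "+", "-", "^", "*", "=", "<", ">","(",")")
-- }
--
-- def id_token(token):
--
--     if len(token)>0:
--         if token in tiny_dict["reserved_words"]:
--             return token+",Reserved Word"
--         elif token in tiny_dict["symbols"]:
--             return token+",Symbol"
--         # in case no spaces were left between operations
--         for operator in tiny_dict["symbols"]:
--             operator_index = token.find(operator)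
--             if operator_index == 0:
--                 return operator+",Symbol\r\n"+id_token(token[operator_index+len(operator):])
--             elif operator_index == len(token)-1:
--                 return id_token(token[0:operator_index]) + "\r\n" + operator + ",Symbol"
--             elif operator_index > 0:
--                 return id_token(token[0:operator_index])+"\r\n"+operator+",Symbol\r\n"+id_token(token[operator_index+len(operator):])
--
--         if token[0].isdigit():
--             return token+",Number"
--         else:
--             return token+",Identifier"
--     else:
--         return ""
-- ===== SOURCE B (Python) =====
-- def id_token(token):
--     reserved = ("if", "then", "else", "repeat", "read", "write", "until", "end")
--     symbols = ("/", ":=", "+", "-", "^", "*", "=", "<", ">", "(", ")")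
--     out = []
--     stack = [(False, token)]
--     while stack:
--         lit, s = stack.pop()
--         if lit:
--             out.append(s)
--             continue
--         if not s:
--             continue
--         if s in reserved:
--             out.append(s + ",Reserved Word")
--             continue
--         if s in symbols:
--             out.append(s + ",Symbol")
--             continue
--         hit = None
--         for op in symbols:
--             i = s.find(op)
--             if i >= 0:
--                 hit = (op, i)
--                 break
--         if hit is None:
--             out.append(s + (",Number" if s[0].isdigit() else ",Identifier"))
--             continue
--         op, i = hit
--         if i == 0:
--             stack.append((False, s[len(op):]))
--             stack.append((True, op + ",Symbol\r\n"))
--         elif i == len(s) - 1: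
--             stack.append((True, "\r\n" + op + ",Symbol"))
--             stack.append((False, s[:i]))
--         else:
--             stack.append((False, s[i + len(op):]))
--             stack.append((True, "\r\n" + op + ",Symbol\r\n"))
--             stack.append((False, s[:i]))
--     return "".join(out)
-- ===== Notes on version B (the rewrite author's own statement) =====
-- stated objective: alternative
-- what changed: Replaces A's self-recursion by an iterative worklist loop: an explicit stack of pending substrings and literal fragments is popped and classified, splits push left/fragment/right back onto the stack, and the output pieces are joined once at the end.
import Mathlib
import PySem

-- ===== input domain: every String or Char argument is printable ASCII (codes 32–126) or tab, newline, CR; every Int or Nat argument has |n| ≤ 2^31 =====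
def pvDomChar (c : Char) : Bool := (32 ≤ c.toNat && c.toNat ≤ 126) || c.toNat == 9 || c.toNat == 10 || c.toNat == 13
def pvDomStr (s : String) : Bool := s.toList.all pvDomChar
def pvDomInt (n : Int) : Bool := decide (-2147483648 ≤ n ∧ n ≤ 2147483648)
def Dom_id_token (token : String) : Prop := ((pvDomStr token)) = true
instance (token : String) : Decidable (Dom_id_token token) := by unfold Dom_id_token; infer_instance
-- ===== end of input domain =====

-- B replaces A's recursion by an iterative worklist loop (explicit stack of pending
-- substrings / literal fragments, output pieces joined at the end); same result, same cost.


-- ===== PORT A =====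
def pvReservedA : List (List Char) :=
  [['i','f'], ['t','h','e','n'], ['e','l','s','e'], ['r','e','p','e','a','t'],
   ['r','e','a','d'], ['w','r','i','t','e'], ['u','n','t','i','l'], ['e','n','d']]

def pvSymbolsA : List (List Char) :=
  [['/'], [':','='], ['+'], ['-'], ['^'], ['*'], ['='], ['<'], ['>'], ['('], [')']]

-- A's for-loop: it returns on the FIRST operator (in tuple order) with token.find(op) >= 0,
-- branching on that index; so the loop is: first (op, find-index) with index >= 0, if any.
def pvFindOpA (t : List Char) : Option (List Char × Nat) :=
  pvSymbolsA.findSome? (fun op =>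
    let i := PySem.Chars.find t op
    if 0 ≤ i then some (op, i.toNat) else none)

-- termination helper for the port (cited in decreasing_by)
theorem pvFindOpA_bounds (t op : List Char) (i : Nat) (h : pvFindOpA t = some (op, i)) :
    1 ≤ op.length ∧ i + op.length ≤ t.length := by
  obtain ⟨op', hmem, hf⟩ := List.exists_of_findSome?_eq_some h
  simp only at hf
  split_ifs at hf with h0
  simp only [Option.some.injEq, Prod.mk.injEq] at hf
  obtain ⟨rfl, rfl⟩ := hf
  have hne : PySem.Chars.find t op' ≠ -1 := by omega
  have hspec := PySem.Chars.findFrom_natCast_spec t op' 0 (by omega) (by simpa using hne)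
  simp only [Nat.cast_zero, PySem.Chars.findFrom_zero] at hspec
  obtain ⟨-, hpre, -⟩ := hspec
  have hlen := hpre.length_le
  simp only [List.length_drop] at hlen
  have hop : 1 ≤ op'.length := by
    have hall : ∀ x ∈ pvSymbolsA, 1 ≤ x.length := by decide
    exact hall op' hmem
  exact ⟨hop, by omega⟩

-- token[i+len(op):] / token[0:i] have nonnegative bounds, so the slices are drop/take
-- (PySem.List.slice_from_natCast / slice_natCast).
def pvIdCore (t : List Char) : List Char :=
  if 0 < t.length then
    if t ∈ pvReservedA then t ++ (",Reserved Word".toList)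
    else if t ∈ pvSymbolsA then t ++ (",Symbol".toList)
    else
      match hf : pvFindOpA t with
      | some (op, i) =>
        if i = 0 then
          op ++ (",Symbol\r\n".toList) ++ pvIdCore (t.drop (i + op.length))
        else if i = t.length - 1 then
          pvIdCore (t.take i) ++ ("\r\n".toList) ++ op ++ (",Symbol".toList)
        else
          pvIdCore (t.take i) ++ ("\r\n".toList) ++ op ++ (",Symbol\r\n".toList) ++
            pvIdCore (t.drop (i + op.length))
      | none =>
        if PySem.Chars.isdigit t.headI then t ++ (",Number".toList) else t ++ (",Identifier".toList)
  else []
termination_by t.length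
decreasing_by
  all_goals
    have hb := pvFindOpA_bounds t op i hf
    simp only [List.length_drop, List.length_take]
    omega

def id_token (token : String) : String := String.ofList (pvIdCore token.toList)

-- ===== PORT B =====
def pvReservedB : List (List Char) :=
  [['i','f'], ['t','h','e','n'], ['e','l','s','e'], ['r','e','p','e','a','t'],
   ['r','e','a','d'], ['w','r','i','t','e'], ['u','n','t','i','l'], ['e','n','d']]

def pvSymbolsB : List (List Char) :=
  [['/'], [':','='], ['+'], ['-'], ['^'], ['*'], ['='], ['<'], ['>'], ['('], [')']]

-- B's inner for-loop with break: first operator found in s, else none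
def pvScanB : List (List Char) → List Char → Option (List Char × Nat)
  | [], _ => none
  | op :: rest, s =>
    if 0 ≤ PySem.Chars.find s op then some (op, (PySem.Chars.find s op).toNat)
    else pvScanB rest s

theorem pvScanB_eq_findOpA (s : List Char) : pvScanB pvSymbolsB s = pvFindOpA s := by
  have gen : ∀ ops : List (List Char), pvScanB ops s =
      ops.findSome? (fun op =>
        let i := PySem.Chars.find s op
        if 0 ≤ i then some (op, i.toNat) else none) := by
    intro ops
    induction ops with
    | nil => rfl
    | cons op rest ih =>
      simp only [pvScanB, List.findSome?_cons]
      split_ifs with h <;> simp [h, ih]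
  exact gen pvSymbolsA

-- termination measure for the worklist loop
def pvWeight : List (Bool × List Char) → Nat
  | [] => 0
  | (true, _) :: rest => 1 + pvWeight rest
  | (false, s) :: rest => 4 * s.length + 2 + pvWeight rest

theorem pvScanB_bounds (s op : List Char) (i : Nat) (h : pvScanB pvSymbolsB s = some (op, i)) :
    1 ≤ op.length ∧ i + op.length ≤ s.length :=
  pvFindOpA_bounds s op i (pvScanB_eq_findOpA s ▸ h)

def pvIdLoop : List (Bool × List Char) → List (List Char) → List (List Char)
  | [], out => out
  | (true, s) :: rest, out => pvIdLoop rest (out ++ [s])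
  | (false, s) :: rest, out =>
    if s = [] then pvIdLoop rest out
    else if s ∈ pvReservedB then pvIdLoop rest (out ++ [s ++ (",Reserved Word".toList)])
    else if s ∈ pvSymbolsB then pvIdLoop rest (out ++ [s ++ (",Symbol".toList)])
    else
      match hs : pvScanB pvSymbolsB s with
      | none =>
        pvIdLoop rest (out ++ [s ++ (if PySem.Chars.isdigit s.headI then ",Number".toList else ",Identifier".toList)])
      | some (op, i) =>
        if i = 0 then
          pvIdLoop ((true, op ++ (",Symbol\r\n".toList)) :: (false, s.drop (i + op.length)) :: rest) out
        else if i = s.length - 1 then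
          pvIdLoop ((false, s.take i) :: (true, ("\r\n".toList) ++ op ++ (",Symbol".toList)) :: rest) out
        else
          pvIdLoop ((false, s.take i) :: (true, ("\r\n".toList) ++ op ++ (",Symbol\r\n".toList)) ::
            (false, s.drop (i + op.length)) :: rest) out
termination_by stack _ => pvWeight stack
decreasing_by
  all_goals
    first
      | (simp only [pvWeight]; omega)
      | (have hb := pvScanB_bounds s op i hs
         simp only [pvWeight, List.length_drop, List.length_take]
         omega)

-- "".join(out) = Chars.join with empty separator
def id_token_alt (token : String) : String :=
  String.ofList (PySem.Chars.join [] (pvIdLoop [(false, token.toList)] []))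

-- ===== PRECONDITION & SPEC =====
def Spec_id_token (token : String) (out : String) : Prop := out = id_token_alt token
instance (token : String) (out : String) : Decidable (Spec_id_token token out) := by unfold Spec_id_token; infer_instance

-- ===== CLAIM (what is proved, stated in full; the proofs are below) =====
def Claim_equal_id_token : Prop := ∀ (token : String), Dom_id_token token → Spec_id_token token (id_token token)

-- ===== LEMMAS AND PROOFS =====

-- meaning of one stack entry: a literal fragment, or the classification of a pending substring
def pvRender : Bool × List Char → List Char
  | (true, s) => s
  | (false, s) => pvIdCore s

theorem pvJoin_nil (l : List (List Char)) : PySem.Chars.join [] l = l.flatten := by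
  induction l with
  | nil => rfl
  | cons x xs ih => cases xs <;> simp_all [PySem.Chars.join, List.intercalate, List.intersperse]

theorem pvIdCore_nil : pvIdCore [] = [] := by rw [pvIdCore.eq_def]; simp

theorem pvIdCore_res (s : List Char) (h0 : s ≠ []) (hres : s ∈ pvReservedA) :
    pvIdCore s = s ++ (",Reserved Word".toList) := by
  rw [pvIdCore.eq_def, if_pos (List.length_pos_iff.mpr h0), if_pos hres]

theorem pvIdCore_sym (s : List Char) (h0 : s ≠ []) (hres : s ∉ pvReservedA)
    (hsym : s ∈ pvSymbolsA) : pvIdCore s = s ++ (",Symbol".toList) := by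
  rw [pvIdCore.eq_def, if_pos (List.length_pos_iff.mpr h0), if_neg hres, if_pos hsym]

theorem pvIdCore_noscan (s : List Char) (h0 : s ≠ []) (hres : s ∉ pvReservedA)
    (hsym : s ∉ pvSymbolsA) (hf : pvFindOpA s = none) :
    pvIdCore s = s ++ (if PySem.Chars.isdigit s.headI then ",Number".toList else ",Identifier".toList) := by
  rw [pvIdCore.eq_def, if_pos (List.length_pos_iff.mpr h0), if_neg hres, if_neg hsym]
  split
  · next heq => rw [hf] at heq; cases heq
  · split <;> rfl

theorem pvIdCore_scan (s op : List Char) (i : Nat) (h0 : s ≠ []) (hres : s ∉ pvReservedA)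
    (hsym : s ∉ pvSymbolsA) (hf : pvFindOpA s = some (op, i)) :
    pvIdCore s =
      if i = 0 then op ++ (",Symbol\r\n".toList) ++ pvIdCore (s.drop (i + op.length))
      else if i = s.length - 1 then
        pvIdCore (s.take i) ++ ("\r\n".toList) ++ op ++ (",Symbol".toList)
      else
        pvIdCore (s.take i) ++ ("\r\n".toList) ++ op ++ (",Symbol\r\n".toList) ++
          pvIdCore (s.drop (i + op.length)) := by
  rw [pvIdCore.eq_def, if_pos (List.length_pos_iff.mpr h0), if_neg hres, if_neg hsym]
  split
  · next op' i' heq =>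
    rw [hf] at heq
    cases heq
    rfl
  · next heq => rw [hf] at heq; cases heq

theorem pvLoop_flatten (stack : List (Bool × List Char)) (out : List (List Char)) :
    (pvIdLoop stack out).flatten = out.flatten ++ (stack.map pvRender).flatten := by
  induction stack, out using pvIdLoop.induct with
  | case1 out => simp [pvIdLoop]
  | case2 s rest out ih => simp [pvIdLoop, pvRender, ih]
  | case3 rest out ih =>
    rw [pvIdLoop.eq_def]
    simp [pvRender, pvIdCore_nil, ih]
  | case4 s rest out h0 hres ih =>
    rw [pvIdLoop.eq_def]
    simp only [if_neg h0, if_pos hres]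
    rw [ih]
    simp [pvRender, pvIdCore_res s h0 hres]
  | case5 s rest out h0 hres hsym ih =>
    rw [pvIdLoop.eq_def]
    simp only [if_neg h0, if_neg hres, if_pos hsym]
    rw [ih]
    simp [pvRender, pvIdCore_sym s h0 hres hsym]
  | case6 s rest out h0 hres hsym hs ih =>
    rw [pvIdLoop.eq_def]
    simp only [if_neg h0, if_neg hres, if_neg hsym]
    rw [pvScanB_eq_findOpA] at hs
    split
    · simp only [dite_eq_ite] at ih
      rw [ih]
      by_cases hd : PySem.Chars.isdigit s.headI <;>
        simp [pvRender, pvIdCore_noscan s h0 hres hsym hs, hd]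
    · next heq => rw [pvScanB_eq_findOpA, hs] at heq; cases heq
  | case7 s rest out h0 hres hsym op hs ih =>
    rw [pvIdLoop.eq_def]
    simp only [if_neg h0, if_neg hres, if_neg hsym]
    have hsA : pvFindOpA s = some (op, 0) := pvScanB_eq_findOpA s ▸ hs
    split
    · next heq => rw [pvScanB_eq_findOpA, hsA] at heq; cases heq
    · next op' i' heq =>
      rw [pvScanB_eq_findOpA, hsA] at heq
      cases heq
      rw [if_pos rfl, ih]
      simp [pvRender, pvIdCore_scan s op 0 h0 hres hsym hsA]
  | case8 s rest out h0 hres hsym op hs hi ih =>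
    rw [pvIdLoop.eq_def]
    simp only [if_neg h0, if_neg hres, if_neg hsym]
    have hsA : pvFindOpA s = some (op, s.length - 1) := pvScanB_eq_findOpA s ▸ hs
    split
    · next heq => rw [pvScanB_eq_findOpA, hsA] at heq; cases heq
    · next op' i' heq =>
      rw [pvScanB_eq_findOpA, hsA] at heq
      cases heq
      rw [if_neg hi, if_pos rfl, ih]
      simp [pvRender, pvIdCore_scan s op (s.length - 1) h0 hres hsym hsA, hi]
  | case9 s rest out h0 hres hsym op i hs hi hlast ih =>
    rw [pvIdLoop.eq_def]
    simp only [if_neg h0, if_neg hres, if_neg hsym]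
    have hsA : pvFindOpA s = some (op, i) := pvScanB_eq_findOpA s ▸ hs
    split
    · next heq => rw [pvScanB_eq_findOpA, hsA] at heq; cases heq
    · next op' i' heq =>
      rw [pvScanB_eq_findOpA, hsA] at heq
      cases heq
      rw [if_neg hi, if_neg hlast, ih]
      simp [pvRender, pvIdCore_scan s op i h0 hres hsym hsA, hi, hlast]

-- ===== VERDICT (by name: the statement is the Claim_ definition above) =====
theorem id_token_spec : Claim_equal_id_token := by
  intro token _
  unfold Spec_id_token id_token id_token_alt
  rw [pvJoin_nil, pvLoop_flatten]
  simp [pvRender]
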